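-- pv_equiv track=rewrite | github.com/zhu-jl18/novel-proofer | novel_proofer/runner.py | _count_leading_blank_lines
-- ===== SOURCE A (Python) =====
-- def _normalize_newlines(text: str) -> str:
--     if "\r" not in text:
--         return text
--     return text.replace("\r\n", "\n").replace("\r", "\n")
--
-- def _count_leading_blank_lines(text: str) -> int:
--     text = _normalize_newlines(text)
--     n = 0
--     i = 0
--     while True:
--         j = text.find("\n", i)
--         if j < 0:
--             break
--         line = text[i:j]
--         if line.strip() != "":
--             break
--         n += 1
--         i = j + 1
--     return n
-- ===== SOURCE B (Python) =====
-- def _normalize_newlines(text: str) -> str: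
--     if "\r" not in text:
--         return text
--     return text.replace("\r\n", "\n").replace("\r", "\n")
--
-- def _count_leading_blank_lines(text: str) -> int:
--     lines = _normalize_newlines(text).split("\n")
--     n = 0
--     for line in lines[:-1]:
--         if line.strip() != "":
--             break
--         n += 1
--     return n
-- ===== Notes on version B (the rewrite author's own statement) =====
-- stated objective: simpler
-- what changed: Replaces A's manual str.find index-walking while-loop (find the next newline from i, slice the line, advance i past it) by one up-front split on newline plus a single counting pass over lines[:-1] that stops at the first non-blank line.
import Mathlib
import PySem

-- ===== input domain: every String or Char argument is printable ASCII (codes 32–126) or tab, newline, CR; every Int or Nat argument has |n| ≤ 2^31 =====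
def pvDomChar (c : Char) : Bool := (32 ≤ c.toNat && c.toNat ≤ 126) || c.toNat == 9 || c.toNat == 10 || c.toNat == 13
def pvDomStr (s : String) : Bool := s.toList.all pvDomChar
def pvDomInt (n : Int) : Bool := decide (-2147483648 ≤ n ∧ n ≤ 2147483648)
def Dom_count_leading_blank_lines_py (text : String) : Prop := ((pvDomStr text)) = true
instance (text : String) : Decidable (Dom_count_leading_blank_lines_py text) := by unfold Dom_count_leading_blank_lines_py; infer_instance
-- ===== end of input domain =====

-- B replaces A's repeated str.find index-walking by one split('\n') plus a single counting pass over lines[:-1] (simpler decomposition; return values proved equal).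

-- ===== PORT A =====
-- shared module helper _normalize_newlines (both Pythons contain this same helper verbatim)
def pvNormalizeNewlines (cs : List Char) : List Char :=
  if PySem.Chars.isIn ['\r'] cs = false then cs
  else PySem.Chars.replace (PySem.Chars.replace cs ['\r', '\n'] ['\n']) ['\r'] ['\n']

-- A's 'while True' loop: j = text.find('\n', i); break on j<0; line = text[i:j]; break on non-blank; n+=1; i=j+1.
-- fuel only makes the loop total; text.length+1 steps always suffice (each step moves i past a '\n').
def pvLoopA (cs : List Char) : Nat → Nat → Int → Int
  | 0, _, n => n
  | fuel + 1, i, n =>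
    let j := PySem.Chars.findFrom cs ['\n'] (i : Int) none
    if j < 0 then n
    else
      let line := PySem.List.slice cs (some (i : Int)) (some j)
      if PySem.Chars.strip line ≠ [] then n
      else pvLoopA cs fuel (j.toNat + 1) (n + 1)

def count_leading_blank_lines_py (text : String) : Int :=
  let cs := pvNormalizeNewlines text.toList
  pvLoopA cs (cs.length + 1) 0 0

-- ===== PORT B =====
-- B's for-loop over lines[:-1]: count while line.strip() == '', break at the first non-blank line.
def pvCountBlank : List (List Char) → Int
  | [] => 0
  | l :: ls => if PySem.Chars.strip l = [] then 1 + pvCountBlank ls else 0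

def count_leading_blank_lines_py_alt (text : String) : Int :=
  let lines := PySem.Chars.splitOn (pvNormalizeNewlines text.toList) ['\n']
  pvCountBlank (PySem.List.slice lines none (some (-1)))

-- ===== PRECONDITION & SPEC =====
def Spec_count_leading_blank_lines_py (text : String) (out : Int) : Prop := out = count_leading_blank_lines_py_alt text
instance (text : String) (out : Int) : Decidable (Spec_count_leading_blank_lines_py text out) := by unfold Spec_count_leading_blank_lines_py; infer_instance

-- ===== CLAIM (what is proved, stated in full; the proofs are below) =====
def Claim_equal_count_leading_blank_lines_py : Prop := ∀ (text : String), Dom_count_leading_blank_lines_py text → Spec_count_leading_blank_lines_py text (count_leading_blank_lines_py text)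

-- ===== LEMMAS AND PROOFS =====

-- structural single-char '\n' splitter: reference form of splitOn for the proof
def pvConsHead (p : List Char) : List (List Char) → List (List Char)
  | [] => [p]
  | h :: t => (p ++ h) :: t

def pvSplitNl : List Char → List (List Char)
  | [] => [[]]
  | c :: rest => if c = '\n' then [] :: pvSplitNl rest else pvConsHead [c] (pvSplitNl rest)

theorem pvSplitNl_ne_nil (cs : List Char) : pvSplitNl cs ≠ [] := by
  cases cs with
  | nil => simp [pvSplitNl]
  | cons c r =>
    simp only [pvSplitNl]
    split
    · simp
    · cases h : pvSplitNl r <;> simp [pvConsHead]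

theorem pv_go_eq : ∀ (fuel : Nat) (l cur : List Char) (acc : List (List Char)),
    l.length < fuel →
    PySem.Chars.splitOn.go ['\n'] fuel l cur acc =
      acc.reverse ++ pvConsHead cur.reverse (pvSplitNl l) := by
  intro fuel
  induction fuel with
  | zero => intro l cur acc h; omega
  | succ fuel ih =>
    intro l cur acc h
    cases l with
    | nil =>
      simp [PySem.Chars.splitOn.go, pvSplitNl, pvConsHead]
    | cons c rest =>
      by_cases hc : c = '\n'
      · subst hc
        have hpref : List.isPrefixOf ['\n'] ('\n' :: rest) = true := by
          simp [List.isPrefixOf]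
        rw [PySem.Chars.splitOn.go]
        simp only [hpref, if_pos]
        rw [ih _ _ _ (by simpa using Nat.lt_of_succ_lt_succ h)]
        simp [pvSplitNl, pvConsHead]
        cases hs : pvSplitNl rest with
        | nil => exact absurd hs (pvSplitNl_ne_nil rest)
        | cons a b => simp
      · have hpref : List.isPrefixOf ['\n'] (c :: rest) = false := by
          simp [List.isPrefixOf]; intro h'; exact absurd h'.symm hc
        rw [PySem.Chars.splitOn.go]
        simp only [hpref]
        rw [if_neg (by simp)]
        rw [ih _ _ _ (by simpa using Nat.lt_of_succ_lt_succ h)]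
        simp only [pvSplitNl, if_neg hc]
        cases hs : pvSplitNl rest with
        | nil => exact absurd hs (pvSplitNl_ne_nil rest)
        | cons a b => simp [pvConsHead]

theorem pvSplitOn_eq_splitNl (cs : List Char) :
    PySem.Chars.splitOn cs ['\n'] = pvSplitNl cs := by
  unfold PySem.Chars.splitOn
  rw [pv_go_eq _ _ _ _ (by omega)]
  simp
  cases hs : pvSplitNl cs with
  | nil => exact absurd hs (pvSplitNl_ne_nil cs)
  | cons a b => simp [pvConsHead]

-- singleton-infix ↔ membership
theorem pv_infix_singleton {c : Char} {d : List Char} : [c] <:+: d ↔ c ∈ d := by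
  constructor
  · intro h; exact h.subset (by simp)
  · intro h
    obtain ⟨s, t, rfl⟩ := List.append_of_mem h
    exact ⟨s, t, by simp⟩

theorem pvSplitNl_no_nl (d : List Char) (h : '\n' ∉ d) : pvSplitNl d = [d] := by
  induction d with
  | nil => rfl
  | cons c rest ih =>
    have hc : c ≠ '\n' := by intro hc; exact h (by simp [hc])
    have hr : '\n' ∉ rest := fun hm => h (by simp [hm])
    simp only [pvSplitNl, if_neg hc, ih hr]
    simp [pvConsHead]

theorem pvSplitNl_first (d : List Char) (m : Nat) (hm : m < d.length)
    (hc : d[m]! = '\n') (hmin : ∀ k < m, ¬ (['\n'] <+: d.drop k)) :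
    pvSplitNl d = d.take m :: pvSplitNl (d.drop (m + 1)) := by
  induction d generalizing m with
  | nil => simp at hm
  | cons c rest ih =>
    cases m with
    | zero =>
      have : c = '\n' := by simpa using hc
      simp [pvSplitNl, this]
    | succ m =>
      have hc0 : c ≠ '\n' := by
        intro h
        exact hmin 0 (Nat.succ_pos m) (by simp [h])
      have hrest := ih m (by simpa using hm) (by simpa using hc)
        (fun k hk => by
          have := hmin (k + 1) (by omega)
          simpa using this)
      simp only [pvSplitNl, if_neg hc0, hrest]
      simp [pvConsHead]

-- the main loop invariant: A's find-walk from index i computes B's count over the split of the rest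
theorem pvLoopA_eq (cs : List Char) : ∀ (fuel i : Nat) (n : Int),
    i ≤ cs.length → cs.length + 1 - i ≤ fuel →
    pvLoopA cs fuel i n = n + pvCountBlank ((pvSplitNl (cs.drop i)).dropLast) := by
  intro fuel
  induction fuel with
  | zero => intro i n hi hf; omega
  | succ fuel ih =>
    intro i n hi hf
    rw [pvLoopA]
    rw [PySem.Chars.findFrom_natCast cs ['\n'] i hi]
    set d := cs.drop i with hd
    by_cases hfind : PySem.Chars.find d ['\n'] = -1
    · -- no newline in the rest
      rw [if_pos hfind, if_pos (by norm_num)]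
      have hnin : '\n' ∉ d := by
        have := PySem.Chars.find_eq_neg_one_iff (s := d) (sub := ['\n'])
        rw [this] at hfind
        intro hm; exact hfind (pv_infix_singleton.2 hm)
      rw [pvSplitNl_no_nl d hnin]
      simp [pvCountBlank]
    · rw [if_neg hfind]
      have hnn : 0 ≤ PySem.Chars.find d ['\n'] :=
        (PySem.Chars.find_nonneg_iff (s := d) (sub := ['\n'])).2
          ((PySem.Chars.find_ne_neg_one_iff (s := d) (sub := ['\n'])).1 hfind)
      set f := PySem.Chars.find d ['\n'] with hfdef
      set m := f.toNat with hmdef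
      have hspec := PySem.Chars.find_spec (s := d) (sub := ['\n']) hnn
      obtain ⟨hpref, hminp⟩ := hspec
      have hmlt : m < d.length := by
        rcases hpref with ⟨t, ht⟩
        have : (d.drop m).length = 1 + t.length := by rw [← ht]; simp; omega
        have h2 : (d.drop m).length = d.length - m := by simp
        omega
      have hfi : (i : Int) + f = ((i + m : Nat) : Int) := by
        push_cast; omega
      rw [if_neg (by rw [hfi]; push_cast; omega)]
      rw [hfi]
      have hslice : PySem.List.slice cs (some (i : Int)) (some ((i + m : Nat) : Int)) =
          d.take m := by
        rw [PySem.List.slice_natCast]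
        rw [hd]; congr 1; omega
      rw [hslice]
      have hcm : d[m]! = '\n' := by
        rcases hpref with ⟨t, ht⟩
        have : d.drop m = '\n' :: t := ht.symm
        have h0 : (d.drop m)[0]! = '\n' := by rw [this]; simp
        rw [getElem!_pos (d.drop m) 0 (by simp [this])] at h0
        rw [getElem!_pos d m hmlt]
        simpa [List.getElem_drop] using h0
      have hsplit := pvSplitNl_first d m hmlt hcm hminp
      rw [hsplit]
      have hne := pvSplitNl_ne_nil (d.drop (m + 1))
      have hdl : (d.take m :: pvSplitNl (d.drop (m + 1))).dropLast =
          d.take m :: (pvSplitNl (d.drop (m + 1))).dropLast := by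
        cases hs : pvSplitNl (d.drop (m + 1)) with
        | nil => exact absurd hs hne
        | cons a b => simp
      rw [hdl]
      have hdlen : d.length = cs.length - i := by rw [hd]; simp
      by_cases hblank : PySem.Chars.strip (d.take m) = []
      · rw [if_neg (by simpa using hblank)]
        have htn : ((i + m : Nat) : Int).toNat + 1 = i + m + 1 := by omega
        rw [htn]
        rw [ih (i + m + 1) (n + 1) (by omega) (by omega)]
        have : cs.drop (i + m + 1) = d.drop (m + 1) := by
          rw [hd, List.drop_drop]; congr 1
        rw [this]
        simp [pvCountBlank, hblank]
        ring
      · rw [if_pos (by simpa using hblank)]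
        simp [pvCountBlank, hblank]

-- ===== VERDICT (by name: the statement is the Claim_ definition above) =====
theorem count_leading_blank_lines_py_spec : Claim_equal_count_leading_blank_lines_py := by
  intro text _
  unfold Spec_count_leading_blank_lines_py count_leading_blank_lines_py count_leading_blank_lines_py_alt
  set cs := pvNormalizeNewlines text.toList with hcs
  simp only []
  rw [pvLoopA_eq cs (cs.length + 1) 0 0 (by omega) (by omega)]
  rw [pvSplitOn_eq_splitNl]
  rw [PySem.List.slice_to_neg_one]
  simp
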